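-- pv_equiv track=rewrite | github.com/busragural/ABSA-on-Reviews | Preprocessing/helpers.py | detect_smiley
-- ===== SOURCE A (Python) =====
-- def detect_smiley(text):
--     smileys = {
--         ':)': 'smiley_positive ',
--         ':-)': 'smiley_positive ',
--         ':(': 'smiley_negative ',
--         ':-(': 'smiley_negative ',
--         ':D': 'smiley_very_positive ',
--         ':-D': 'smiley_very_positive ',
--         ':|': 'smiley_neutral '
--     }
--
--     for smiley, replacement in smileys.items():
--         text = text.replace(smiley, replacement)
--
--     return text
-- ===== SOURCE B (Python) =====
-- import re
--
-- _SMILEYS = {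
--     ':)': 'smiley_positive ',
--     ':-)': 'smiley_positive ',
--     ':(': 'smiley_negative ',
--     ':-(': 'smiley_negative ',
--     ':D': 'smiley_very_positive ',
--     ':-D': 'smiley_very_positive ',
--     ':|': 'smiley_neutral ',
-- }
-- _PAT = re.compile('|'.join(re.escape(tok) for tok in _SMILEYS))
--
-- def detect_smiley(text):
--     return _PAT.sub(lambda m: _SMILEYS[m.group(0)], text)
-- ===== Notes on version B (the rewrite author's own statement) =====
-- stated objective: idiomatic
-- what changed: Replaced seven sequential full-text str.replace passes with a single compiled-regex left-to-right pass (re.sub over an escaped alternation of all tokens, replacement looked up per match).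
import Mathlib
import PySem

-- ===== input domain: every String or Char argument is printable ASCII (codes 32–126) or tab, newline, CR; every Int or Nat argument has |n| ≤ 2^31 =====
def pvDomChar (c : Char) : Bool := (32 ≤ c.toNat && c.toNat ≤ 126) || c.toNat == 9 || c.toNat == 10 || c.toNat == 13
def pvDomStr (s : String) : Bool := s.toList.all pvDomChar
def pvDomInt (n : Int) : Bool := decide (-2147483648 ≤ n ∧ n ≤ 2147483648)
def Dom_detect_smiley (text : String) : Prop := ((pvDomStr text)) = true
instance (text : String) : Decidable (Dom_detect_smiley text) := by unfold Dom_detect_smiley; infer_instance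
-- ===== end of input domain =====

-- B replaces A's seven sequential full-text str.replace passes by one left-to-right
-- single pass (re.sub over an alternation of all smiley tokens); return values proved equal.

-- ===== PORT A =====
def detect_smiley (text : String) : String :=
  let smileys : PySem.Dict String String :=
    (((((((PySem.Dict.empty.insert ":)" "smiley_positive ").insert ":-)" "smiley_positive ").insert
        ":(" "smiley_negative ").insert ":-(" "smiley_negative ").insert
        ":D" "smiley_very_positive ").insert ":-D" "smiley_very_positive ").insert
        ":|" "smiley_neutral ")
  smileys.items.foldl (fun t p => PySem.Str.replace t p.1 p.2) text

-- ===== PORT B =====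
-- Hand port of Source B's compiled-regex pass (PySem has no regex); exact here because
-- re.sub with the alternation ':)|:\-\)|:\(|:\-\(|:D|:\-D|:\|' is precisely: scan left
-- to right, at each position try the tokens in that order, on a match emit its
-- replacement and resume after the match, otherwise copy one character.
def pvScan : List Char → List Char
  | ':' :: ')' :: u => "smiley_positive ".toList ++ pvScan u
  | ':' :: '-' :: ')' :: u => "smiley_positive ".toList ++ pvScan u
  | ':' :: '(' :: u => "smiley_negative ".toList ++ pvScan u
  | ':' :: '-' :: '(' :: u => "smiley_negative ".toList ++ pvScan u
  | ':' :: 'D' :: u => "smiley_very_positive ".toList ++ pvScan u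
  | ':' :: '-' :: 'D' :: u => "smiley_very_positive ".toList ++ pvScan u
  | ':' :: '|' :: u => "smiley_neutral ".toList ++ pvScan u
  | c :: t => c :: pvScan t
  | [] => []

def detect_smiley_alt (text : String) : String := String.ofList (pvScan text.toList)

-- ===== PRECONDITION & SPEC =====
def Spec_detect_smiley (text : String) (out : String) : Prop := out = detect_smiley_alt text
instance (text : String) (out : String) : Decidable (Spec_detect_smiley text out) := by unfold Spec_detect_smiley; infer_instance

-- ===== CLAIM (what is proved, stated in full; the proofs are below) =====
def Claim_equal_detect_smiley : Prop := ∀ (text : String), Dom_detect_smiley text → Spec_detect_smiley text (detect_smiley text)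

-- ===== LEMMAS AND PROOFS =====

-- Clean recursion computing PySem.Chars.replace for a nonempty pattern o1 :: ro.
def pvRepN (o1 : Char) (ro new : List Char) : List Char → List Char
  | [] => []
  | c :: t =>
      if (o1 :: ro).isPrefixOf (c :: t) then new ++ pvRepN o1 ro new (t.drop ro.length)
      else c :: pvRepN o1 ro new t
termination_by l => l.length
decreasing_by
  · simp only [List.length_drop, List.length_cons]; omega
  · simp

theorem pvGo_eq (o1 : Char) (ro new : List Char) :
    ∀ (fuel : Nat) (l acc : List Char), l.length ≤ fuel →
      PySem.Chars.replace.go (o1 :: ro) new fuel l acc = acc.reverse ++ pvRepN o1 ro new l := by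
  intro fuel
  induction fuel with
  | zero =>
      intro l acc h
      have hl : l = [] := List.eq_nil_of_length_eq_zero (Nat.le_zero.mp h)
      subst hl
      simp [PySem.Chars.replace.go, pvRepN]
  | succ n ih =>
      intro l acc h
      cases l with
      | nil => simp [PySem.Chars.replace.go, pvRepN]
      | cons c t =>
          by_cases hp : (o1 :: ro).isPrefixOf (c :: t)
          · have : PySem.Chars.replace.go (o1 :: ro) new (n+1) (c :: t) acc =
                PySem.Chars.replace.go (o1 :: ro) new n ((c :: t).drop (o1 :: ro).length) (new.reverse ++ acc) := by
              simp [PySem.Chars.replace.go, hp]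
            rw [this]
            have hdrop : (c :: t).drop (o1 :: ro).length = t.drop ro.length := by
              simp [List.drop_succ_cons]
            have hlen : (t.drop ro.length).length ≤ n := by
              simp only [List.length_drop]
              simp only [List.length_cons] at h
              omega
            rw [hdrop, ih _ _ hlen]
            simp [pvRepN, hp]
          · have : PySem.Chars.replace.go (o1 :: ro) new (n+1) (c :: t) acc =
                PySem.Chars.replace.go (o1 :: ro) new n t (c :: acc) := by
              simp [PySem.Chars.replace.go, hp]
            rw [this]
            have hlen : t.length ≤ n := by simp only [List.length_cons] at h; omega
            rw [ih _ _ hlen]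
            simp [pvRepN, hp]

theorem pvReplace_eq (o1 : Char) (ro new l : List Char) :
    PySem.Chars.replace l (o1 :: ro) new = pvRepN o1 ro new l := by
  have h := pvGo_eq o1 ro new l.length l [] (le_refl _)
  simpa [PySem.Chars.replace] using h

theorem pvRepN_step (o1 : Char) (ro new : List Char) (c : Char) (t : List Char)
    (h : (o1 :: ro).isPrefixOf (c :: t) = false) :
    pvRepN o1 ro new (c :: t) = c :: pvRepN o1 ro new t := by
  simp [pvRepN, h]

theorem pvRepN_match (o1 : Char) (ro new v : List Char) :
    pvRepN o1 ro new ((o1 :: ro) ++ v) = new ++ pvRepN o1 ro new v := by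
  have hp : (o1 :: ro).isPrefixOf (o1 :: (ro ++ v)) = true := by
    rw [List.isPrefixOf_iff_prefix]
    exact List.prefix_append (o1 :: ro) v
  show pvRepN o1 ro new (o1 :: (ro ++ v)) = new ++ pvRepN o1 ro new v
  rw [pvRepN, if_pos hp, List.drop_left]

-- A mismatch inside u at index m refutes "old is a prefix of u ++ v".
theorem pvNotPrefix (old u v : List Char) (m : Nat) (hm : m < old.length) (hu : m < u.length)
    (hne : old[m]? ≠ u[m]?) : old.isPrefixOf (u ++ v) = false := by
  rw [Bool.eq_false_iff]
  intro h
  rw [List.isPrefixOf_iff_prefix] at h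
  obtain ⟨s, hs⟩ := h
  apply hne
  have h1 : (old ++ s)[m]? = old[m]? := List.getElem?_append_left hm
  have h2 : (u ++ v)[m]? = u[m]? := List.getElem?_append_left hu
  rw [← h1, hs, h2]

-- For every start offset j inside u there is a mismatch with old staying inside u.
def pvPassCond (old u : List Char) : Bool :=
  (List.range u.length).all fun j =>
    (List.range old.length).any fun m =>
      decide (j + m < u.length) && decide (old[m]? ≠ u[j + m]?)

theorem pvPass (o1 : Char) (ro new : List Char) :
    ∀ (u v : List Char), pvPassCond (o1 :: ro) u = true →
      pvRepN o1 ro new (u ++ v) = u ++ pvRepN o1 ro new v := by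
  intro u
  induction u with
  | nil => intro v _; simp
  | cons c u' ih =>
      intro v h
      unfold pvPassCond at h
      rw [List.all_eq_true] at h
      have h0 := h 0 (by simp [List.mem_range])
      rw [List.any_eq_true] at h0
      obtain ⟨m, hm, hcond⟩ := h0
      rw [List.mem_range] at hm
      simp only [Nat.zero_add, Bool.and_eq_true, decide_eq_true_eq] at hcond
      have hnp : (o1 :: ro).isPrefixOf ((c :: u') ++ v) = false :=
        pvNotPrefix _ (c :: u') v m hm hcond.1 hcond.2
      have : (c :: u') ++ v = c :: (u' ++ v) := rfl
      rw [this] at hnp ⊢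
      rw [pvRepN_step _ _ _ _ _ hnp, ih v ?_]
      · rfl
      · unfold pvPassCond
        rw [List.all_eq_true]
        intro j hj
        rw [List.mem_range] at hj
        have hj1 := h (j + 1) (by simp only [List.mem_range, List.length_cons]; omega)
        rw [List.any_eq_true] at hj1
        obtain ⟨m', hm', hc'⟩ := hj1
        rw [List.any_eq_true]
        refine ⟨m', hm', ?_⟩
        simp only [Bool.and_eq_true, decide_eq_true_eq] at hc' ⊢
        constructor
        · simp only [List.length_cons] at hc'; omega
        · have : (c :: u')[j + 1 + m']? = u'[j + m']? := by
            have : j + 1 + m' = (j + m') + 1 := by omega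
            rw [this, List.getElem?_cons_succ]
          rw [this] at hc'
          exact hc'.2

-- The head of a replace result is the original head or the head of the replacement.
theorem pvHead (o1 : Char) (ro new ns : List Char) (c : Char) (t : List Char)
    (hn : new = 's' :: ns) :
    ∃ d l', pvRepN o1 ro new (c :: t) = d :: l' ∧ (d = c ∨ d = 's') := by
  by_cases hp : (o1 :: ro).isPrefixOf (c :: t)
  · refine ⟨'s', ns ++ pvRepN o1 ro new (t.drop ro.length), ?_, Or.inr rfl⟩
    rw [pvRepN, if_pos hp, hn]; rfl
  · refine ⟨c, pvRepN o1 ro new t, ?_, Or.inl rfl⟩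
    rw [pvRepN_step _ _ _ _ _ (Bool.eq_false_iff.mpr hp)]

-- Chars-level step lemmas for the seven tokens (all start with ':').
theorem pvStepNC (ro new : List Char) (c : Char) (l : List Char) (h : c ≠ ':') :
    PySem.Chars.replace (c :: l) (':' :: ro) new = c :: PySem.Chars.replace l (':' :: ro) new := by
  rw [pvReplace_eq, pvReplace_eq, pvRepN_step]
  exact pvNotPrefix _ [c] l 0 (by simp) (by simp) (by simpa using fun hh => h hh.symm)

theorem pvStep2 (b : Char) (new : List Char) (x : Char) (l : List Char) (hx : x ≠ b) :
    PySem.Chars.replace (':' :: x :: l) [':', b] new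
      = ':' :: PySem.Chars.replace (x :: l) [':', b] new := by
  rw [pvReplace_eq, pvReplace_eq, pvRepN_step]
  exact pvNotPrefix [':', b] [':', x] l 1 (by simp) (by simp) (by simpa using fun hh => hx hh.symm)

theorem pvStep3a (b : Char) (new : List Char) (x : Char) (l : List Char) (hx : x ≠ '-') :
    PySem.Chars.replace (':' :: x :: l) [':', '-', b] new
      = ':' :: PySem.Chars.replace (x :: l) [':', '-', b] new := by
  rw [pvReplace_eq, pvReplace_eq, pvRepN_step]
  exact pvNotPrefix [':', '-', b] [':', x] l 1 (by simp) (by simp) (by simpa using fun hh => hx hh.symm)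

theorem pvStep3b (b : Char) (new : List Char) (x : Char) (l : List Char) (hx : x ≠ b) :
    PySem.Chars.replace (':' :: '-' :: x :: l) [':', '-', b] new
      = ':' :: '-' :: PySem.Chars.replace (x :: l) [':', '-', b] new := by
  rw [pvReplace_eq, pvReplace_eq, pvRepN_step, pvRepN_step]
  · exact pvNotPrefix [':', '-', b] ['-'] (x :: l) 0 (by simp) (by simp) (by simp)
  · exact pvNotPrefix [':', '-', b] [':', '-', x] l 2 (by simp) (by simp)
      (by simpa using fun hh => hx hh.symm)

theorem pvMatchC (o1 : Char) (ro new v : List Char) :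
    PySem.Chars.replace ((o1 :: ro) ++ v) (o1 :: ro) new
      = new ++ PySem.Chars.replace v (o1 :: ro) new := by
  rw [pvReplace_eq, pvReplace_eq, pvRepN_match]

theorem pvPassC (o1 : Char) (ro new u v : List Char) (h : pvPassCond (o1 :: ro) u = true) :
    PySem.Chars.replace (u ++ v) (o1 :: ro) new = u ++ PySem.Chars.replace v (o1 :: ro) new := by
  rw [pvReplace_eq, pvReplace_eq]
  exact pvPass o1 ro new u v h

theorem pvHeadC (o1 : Char) (ro new ns : List Char) (c : Char) (t : List Char)
    (hn : new = 's' :: ns) :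
    ∃ d l', PySem.Chars.replace (c :: t) (o1 :: ro) new = d :: l' ∧ (d = c ∨ d = 's') := by
  rw [pvReplace_eq]
  exact pvHead o1 ro new ns c t hn

-- The seven replacement strings, and A's seven sequential passes as one function.
def pvP : List Char := "smiley_positive ".toList
def pvN : List Char := "smiley_negative ".toList
def pvV : List Char := "smiley_very_positive ".toList
def pvU : List Char := "smiley_neutral ".toList

def pvChain (l : List Char) : List Char :=
  PySem.Chars.replace (PySem.Chars.replace (PySem.Chars.replace (PySem.Chars.replace
    (PySem.Chars.replace (PySem.Chars.replace (PySem.Chars.replace l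
      [':', ')'] pvP) [':', '-', ')'] pvP) [':', '('] pvN) [':', '-', '('] pvN)
      [':', 'D'] pvV) [':', '-', 'D'] pvV) [':', '|'] pvU

theorem pvP_eq : pvP = 's' :: "miley_positive ".toList := by decide
theorem pvN_eq : pvN = 's' :: "miley_negative ".toList := by decide
theorem pvV_eq : pvV = 's' :: "miley_very_positive ".toList := by decide

theorem pvChain_nil : pvChain [] = [] := by decide

theorem pvChain_nc (c : Char) (t : List Char) (h : c ≠ ':') :
    pvChain (c :: t) = c :: pvChain t := by
  simp only [pvChain]
  rw [pvStepNC _ _ _ _ h, pvStepNC _ _ _ _ h, pvStepNC _ _ _ _ h, pvStepNC _ _ _ _ h,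
      pvStepNC _ _ _ _ h, pvStepNC _ _ _ _ h, pvStepNC _ _ _ _ h]

theorem pvChainA (d : Char) (t : List Char)
    (h1 : d ≠ ')') (h2 : d ≠ '(') (h3 : d ≠ 'D') (h4 : d ≠ '|') (h5 : d ≠ '-') :
    pvChain (':' :: d :: t) = ':' :: pvChain (d :: t) := by
  simp only [pvChain]
  rw [pvStep2 ')' pvP d t h1]
  obtain ⟨x1, l1, e1, hx1⟩ := pvHeadC ':' [')'] pvP _ d t pvP_eq
  rw [e1]
  rw [pvStep3a ')' pvP x1 l1 (by rcases hx1 with h | h <;> subst h <;> simp [h5])]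
  obtain ⟨x2, l2, e2, hx2⟩ := pvHeadC ':' ['-', ')'] pvP _ x1 l1 pvP_eq
  rw [e2]
  have hd2 : x2 = d ∨ x2 = 's' := by
    rcases hx2 with h | h
    · subst h; exact hx1
    · exact Or.inr h
  rw [pvStep2 '(' pvN x2 l2 (by rcases hd2 with h | h <;> subst h <;> simp [h2])]
  obtain ⟨x3, l3, e3, hx3⟩ := pvHeadC ':' ['('] pvN _ x2 l2 pvN_eq
  rw [e3]
  have hd3 : x3 = d ∨ x3 = 's' := by
    rcases hx3 with h | h
    · subst h; exact hd2
    · exact Or.inr h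
  rw [pvStep3a '(' pvN x3 l3 (by rcases hd3 with h | h <;> subst h <;> simp [h5])]
  obtain ⟨x4, l4, e4, hx4⟩ := pvHeadC ':' ['-', '('] pvN _ x3 l3 pvN_eq
  rw [e4]
  have hd4 : x4 = d ∨ x4 = 's' := by
    rcases hx4 with h | h
    · subst h; exact hd3
    · exact Or.inr h
  rw [pvStep2 'D' pvV x4 l4 (by rcases hd4 with h | h <;> subst h <;> simp [h3])]
  obtain ⟨x5, l5, e5, hx5⟩ := pvHeadC ':' ['D'] pvV _ x4 l4 pvV_eq
  rw [e5]
  have hd5 : x5 = d ∨ x5 = 's' := by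
    rcases hx5 with h | h
    · subst h; exact hd4
    · exact Or.inr h
  rw [pvStep3a 'D' pvV x5 l5 (by rcases hd5 with h | h <;> subst h <;> simp [h5])]
  obtain ⟨x6, l6, e6, hx6⟩ := pvHeadC ':' ['-', 'D'] pvV _ x5 l5 pvV_eq
  rw [e6]
  have hd6 : x6 = d ∨ x6 = 's' := by
    rcases hx6 with h | h
    · subst h; exact hd5
    · exact Or.inr h
  rw [pvStep2 '|' pvU x6 l6 (by rcases hd6 with h | h <;> subst h <;> simp [h4])]

theorem pvChainB (e : Char) (t : List Char)
    (h1 : e ≠ ')') (h2 : e ≠ '(') (h3 : e ≠ 'D') :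
    pvChain (':' :: '-' :: e :: t) = ':' :: '-' :: pvChain (e :: t) := by
  simp only [pvChain]
  rw [pvStep2 ')' pvP '-' (e :: t) (by decide), pvStepNC [')'] pvP '-' (e :: t) (by decide)]
  obtain ⟨x1, l1, e1, hx1⟩ := pvHeadC ':' [')'] pvP _ e t pvP_eq
  rw [e1]
  rw [pvStep3b ')' pvP x1 l1 (by rcases hx1 with h | h <;> subst h <;> simp [h1])]
  obtain ⟨x2, l2, e2, hx2⟩ := pvHeadC ':' ['-', ')'] pvP _ x1 l1 pvP_eq
  rw [e2]
  have hd2 : x2 = e ∨ x2 = 's' := by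
    rcases hx2 with h | h
    · subst h; exact hx1
    · exact Or.inr h
  rw [pvStep2 '(' pvN '-' (x2 :: l2) (by decide), pvStepNC ['('] pvN '-' (x2 :: l2) (by decide)]
  obtain ⟨x3, l3, e3, hx3⟩ := pvHeadC ':' ['('] pvN _ x2 l2 pvN_eq
  rw [e3]
  have hd3 : x3 = e ∨ x3 = 's' := by
    rcases hx3 with h | h
    · subst h; exact hd2
    · exact Or.inr h
  rw [pvStep3b '(' pvN x3 l3 (by rcases hd3 with h | h <;> subst h <;> simp [h2])]
  obtain ⟨x4, l4, e4, hx4⟩ := pvHeadC ':' ['-', '('] pvN _ x3 l3 pvN_eq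
  rw [e4]
  have hd4 : x4 = e ∨ x4 = 's' := by
    rcases hx4 with h | h
    · subst h; exact hd3
    · exact Or.inr h
  rw [pvStep2 'D' pvV '-' (x4 :: l4) (by decide), pvStepNC ['D'] pvV '-' (x4 :: l4) (by decide)]
  obtain ⟨x5, l5, e5, hx5⟩ := pvHeadC ':' ['D'] pvV _ x4 l4 pvV_eq
  rw [e5]
  have hd5 : x5 = e ∨ x5 = 's' := by
    rcases hx5 with h | h
    · subst h; exact hd4
    · exact Or.inr h
  rw [pvStep3b 'D' pvV x5 l5 (by rcases hd5 with h | h <;> subst h <;> simp [h3])]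
  obtain ⟨x6, l6, e6, _⟩ := pvHeadC ':' ['-', 'D'] pvV _ x5 l5 pvV_eq
  rw [e6]
  rw [pvStep2 '|' pvU '-' (x6 :: l6) (by decide), pvStepNC ['|'] pvU '-' (x6 :: l6) (by decide)]

-- The seven token-match cases of A's chain.
theorem pvChainM1 (t : List Char) : pvChain ([':', ')'] ++ t) = pvP ++ pvChain t := by
  simp only [pvChain]
  rw [pvMatchC ':' [')'] pvP t,
      pvPassC ':' ['-', ')'] pvP pvP _ (by decide),
      pvPassC ':' ['('] pvN pvP _ (by decide),
      pvPassC ':' ['-', '('] pvN pvP _ (by decide),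
      pvPassC ':' ['D'] pvV pvP _ (by decide),
      pvPassC ':' ['-', 'D'] pvV pvP _ (by decide),
      pvPassC ':' ['|'] pvU pvP _ (by decide)]

theorem pvChainM2 (t : List Char) : pvChain ([':', '-', ')'] ++ t) = pvP ++ pvChain t := by
  simp only [pvChain]
  rw [pvPassC ':' [')'] pvP [':', '-', ')'] t (by decide),
      pvMatchC ':' ['-', ')'] pvP _,
      pvPassC ':' ['('] pvN pvP _ (by decide),
      pvPassC ':' ['-', '('] pvN pvP _ (by decide),
      pvPassC ':' ['D'] pvV pvP _ (by decide),
      pvPassC ':' ['-', 'D'] pvV pvP _ (by decide),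
      pvPassC ':' ['|'] pvU pvP _ (by decide)]

theorem pvChainM3 (t : List Char) : pvChain ([':', '('] ++ t) = pvN ++ pvChain t := by
  simp only [pvChain]
  rw [pvPassC ':' [')'] pvP [':', '('] t (by decide),
      pvPassC ':' ['-', ')'] pvP [':', '('] _ (by decide),
      pvMatchC ':' ['('] pvN _,
      pvPassC ':' ['-', '('] pvN pvN _ (by decide),
      pvPassC ':' ['D'] pvV pvN _ (by decide),
      pvPassC ':' ['-', 'D'] pvV pvN _ (by decide),
      pvPassC ':' ['|'] pvU pvN _ (by decide)]

theorem pvChainM4 (t : List Char) : pvChain ([':', '-', '('] ++ t) = pvN ++ pvChain t := by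
  simp only [pvChain]
  rw [pvPassC ':' [')'] pvP [':', '-', '('] t (by decide),
      pvPassC ':' ['-', ')'] pvP [':', '-', '('] _ (by decide),
      pvPassC ':' ['('] pvN [':', '-', '('] _ (by decide),
      pvMatchC ':' ['-', '('] pvN _,
      pvPassC ':' ['D'] pvV pvN _ (by decide),
      pvPassC ':' ['-', 'D'] pvV pvN _ (by decide),
      pvPassC ':' ['|'] pvU pvN _ (by decide)]

theorem pvChainM5 (t : List Char) : pvChain ([':', 'D'] ++ t) = pvV ++ pvChain t := by
  simp only [pvChain]
  rw [pvPassC ':' [')'] pvP [':', 'D'] t (by decide),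
      pvPassC ':' ['-', ')'] pvP [':', 'D'] _ (by decide),
      pvPassC ':' ['('] pvN [':', 'D'] _ (by decide),
      pvPassC ':' ['-', '('] pvN [':', 'D'] _ (by decide),
      pvMatchC ':' ['D'] pvV _,
      pvPassC ':' ['-', 'D'] pvV pvV _ (by decide),
      pvPassC ':' ['|'] pvU pvV _ (by decide)]

theorem pvChainM6 (t : List Char) : pvChain ([':', '-', 'D'] ++ t) = pvV ++ pvChain t := by
  simp only [pvChain]
  rw [pvPassC ':' [')'] pvP [':', '-', 'D'] t (by decide),
      pvPassC ':' ['-', ')'] pvP [':', '-', 'D'] _ (by decide),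
      pvPassC ':' ['('] pvN [':', '-', 'D'] _ (by decide),
      pvPassC ':' ['-', '('] pvN [':', '-', 'D'] _ (by decide),
      pvPassC ':' ['D'] pvV [':', '-', 'D'] _ (by decide),
      pvMatchC ':' ['-', 'D'] pvV _,
      pvPassC ':' ['|'] pvU pvV _ (by decide)]

theorem pvChainM7 (t : List Char) : pvChain ([':', '|'] ++ t) = pvU ++ pvChain t := by
  simp only [pvChain]
  rw [pvPassC ':' [')'] pvP [':', '|'] t (by decide),
      pvPassC ':' ['-', ')'] pvP [':', '|'] _ (by decide),
      pvPassC ':' ['('] pvN [':', '|'] _ (by decide),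
      pvPassC ':' ['-', '('] pvN [':', '|'] _ (by decide),
      pvPassC ':' ['D'] pvV [':', '|'] _ (by decide),
      pvPassC ':' ['-', 'D'] pvV [':', '|'] _ (by decide),
      pvMatchC ':' ['|'] pvU _]

-- pvScan equations for the non-token cases.
theorem pvScan_nc (c : Char) (t : List Char) (h : c ≠ ':') :
    pvScan (c :: t) = c :: pvScan t := by
  rw [pvScan.eq_def]
  split <;> simp_all

theorem pvScan_A (d : Char) (t : List Char)
    (h1 : d ≠ ')') (h2 : d ≠ '(') (h3 : d ≠ 'D') (h4 : d ≠ '|') (h5 : d ≠ '-') :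
    pvScan (':' :: d :: t) = ':' :: pvScan (d :: t) := by
  rw [pvScan.eq_def]
  split <;> try simp_all
  all_goals (rename_i heq; exact heq.1.symm)

theorem pvScan_B (e : Char) (t : List Char)
    (h1 : e ≠ ')') (h2 : e ≠ '(') (h3 : e ≠ 'D') :
    pvScan (':' :: '-' :: e :: t) = ':' :: '-' :: pvScan (e :: t) := by
  have : pvScan (':' :: '-' :: e :: t) = ':' :: pvScan ('-' :: e :: t) := by
    rw [pvScan.eq_def]
    split <;> try simp_all
    all_goals (rename_i heq; exact heq.1.symm)
  rw [this, pvScan_nc '-' (e :: t) (by decide)]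

-- Main equivalence on character lists, by strong induction on the length.
theorem pvMain : ∀ (n : Nat) (l : List Char), l.length ≤ n → pvChain l = pvScan l := by
  intro n
  induction n with
  | zero =>
      intro l h
      have hl : l = [] := List.eq_nil_of_length_eq_zero (Nat.le_zero.mp h)
      subst hl
      exact pvChain_nil
  | succ n ih =>
      intro l hl
      cases l with
      | nil => exact pvChain_nil
      | cons c t =>
          by_cases hc : c = ':'
          · subst hc
            cases t with
            | nil => decide
            | cons d u =>
                simp only [List.length_cons] at hl
                by_cases h1 : d = ')'
                · subst h1
                  have := pvChainM1 u
                  rw [show (':' :: ')' :: u) = [':', ')'] ++ u from rfl, this,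
                      ih u (by omega)]
                  rfl
                by_cases h2 : d = '('
                · subst h2
                  rw [show (':' :: '(' :: u) = [':', '('] ++ u from rfl, pvChainM3 u,
                      ih u (by omega)]
                  rfl
                by_cases h3 : d = 'D'
                · subst h3
                  rw [show (':' :: 'D' :: u) = [':', 'D'] ++ u from rfl, pvChainM5 u,
                      ih u (by omega)]
                  rfl
                by_cases h4 : d = '|'
                · subst h4
                  rw [show (':' :: '|' :: u) = [':', '|'] ++ u from rfl, pvChainM7 u,
                      ih u (by omega)]
                  rfl
                by_cases h5 : d = '-'
                · subst h5
                  cases u with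
                  | nil => decide
                  | cons e w =>
                      simp only [List.length_cons] at hl
                      by_cases g1 : e = ')'
                      · subst g1
                        rw [show (':' :: '-' :: ')' :: w) = [':', '-', ')'] ++ w from rfl,
                            pvChainM2 w, ih w (by omega)]
                        rfl
                      by_cases g2 : e = '('
                      · subst g2
                        rw [show (':' :: '-' :: '(' :: w) = [':', '-', '('] ++ w from rfl,
                            pvChainM4 w, ih w (by omega)]
                        rfl
                      by_cases g3 : e = 'D'
                      · subst g3
                        rw [show (':' :: '-' :: 'D' :: w) = [':', '-', 'D'] ++ w from rfl,
                            pvChainM6 w, ih w (by omega)]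
                        rfl
                      · rw [pvChainB e w g1 g2 g3, pvScan_B e w g1 g2 g3,
                            ih (e :: w) (by simp only [List.length_cons]; omega)]
                · rw [pvChainA d u h1 h2 h3 h4 h5, pvScan_A d u h1 h2 h3 h4 h5,
                      ih (d :: u) (by simp only [List.length_cons]; omega)]
          · rw [pvChain_nc c t hc, pvScan_nc c t hc,
                ih t (by simp only [List.length_cons] at hl; omega)]

-- A's port computes exactly the seven-pass chain on the character list.
theorem pvDetect_eq (text : String) :
    detect_smiley text = String.ofList (pvChain text.toList) := by
  have hi : (((((((PySem.Dict.empty.insert ":)" "smiley_positive ").insert ":-)" "smiley_positive ").insert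
        ":(" "smiley_negative ").insert ":-(" "smiley_negative ").insert
        ":D" "smiley_very_positive ").insert ":-D" "smiley_very_positive ").insert
        ":|" "smiley_neutral " : PySem.Dict String String).items =
      [(":)", "smiley_positive "), (":-)", "smiley_positive "), (":(", "smiley_negative "),
       (":-(", "smiley_negative "), (":D", "smiley_very_positive "),
       (":-D", "smiley_very_positive "), (":|", "smiley_neutral ")] := by decide
  simp only [detect_smiley, hi, List.foldl]
  simp only [PySem.Str.replace, String.toList_ofList, pvChain]
  have t1 : (":)" : String).toList = [':', ')'] := by decide
  have t2 : (":-)" : String).toList = [':', '-', ')'] := by decide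
  have t3 : (":(" : String).toList = [':', '('] := by decide
  have t4 : (":-(" : String).toList = [':', '-', '('] := by decide
  have t5 : (":D" : String).toList = [':', 'D'] := by decide
  have t6 : (":-D" : String).toList = [':', '-', 'D'] := by decide
  have t7 : (":|" : String).toList = [':', '|'] := by decide
  rw [t1, t2, t3, t4, t5, t6, t7]
  rfl

-- ===== VERDICT (by name: the statement is the Claim_ definition above) =====
theorem detect_smiley_spec : Claim_equal_detect_smiley := by
  intro text _
  show detect_smiley text = detect_smiley_alt text
  rw [pvDetect_eq, detect_smiley_alt]
  exact congrArg String.ofList (pvMain text.toList.length text.toList (le_refl _))
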